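-- pv_equiv track=rewrite | github.com/calvinchankf/GoogleKickStart | 2020/G/a.py | f
-- ===== SOURCE A (Python) =====
-- def f(S):
--     count = 0
--     kickCount = 0
--     for i in range(len(S)):
--         if S[i:i+4] == 'KICK':
--             kickCount += 1
--         elif S[i:i+5] == 'START':
--             count += kickCount
--     return count
-- ===== SOURCE B (Python) =====
-- def f(S):
--     n = len(S)
--     kickIdx = [i for i in range(n) if S[i:i+4] == 'KICK']
--     startIdx = [i for i in range(n) if S[i:i+5] == 'START']
--     total = 0
--     kc = 0
--     j = 0
--     for s in startIdx:
--         while j < len(kickIdx) and kickIdx[j] < s: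
--             kc += 1
--             j += 1
--         total += kc
--     return total
-- ===== Notes on version B (the rewrite author's own statement) =====
-- stated objective: alternative
-- what changed: A counts in one scan with a running kick counter updated at every position; B first builds the sorted lists of KICK and START match positions and then sums, via a separate two-pointer pass, the number of kick positions before each start position.
import Mathlib
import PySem

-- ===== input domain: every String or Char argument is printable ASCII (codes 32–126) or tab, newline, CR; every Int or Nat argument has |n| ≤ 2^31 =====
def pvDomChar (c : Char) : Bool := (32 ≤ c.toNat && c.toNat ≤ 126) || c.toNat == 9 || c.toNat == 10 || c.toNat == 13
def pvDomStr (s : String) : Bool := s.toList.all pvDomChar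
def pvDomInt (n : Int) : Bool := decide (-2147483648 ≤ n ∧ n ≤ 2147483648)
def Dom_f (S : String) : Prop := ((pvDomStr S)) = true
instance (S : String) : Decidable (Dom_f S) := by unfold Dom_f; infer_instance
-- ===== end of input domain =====

-- B separates match-finding (two index lists) from the counting (a two-pointer pass); same cost, a different decomposition.
-- String slices S[i:i+4] == 'KICK' are ported exactly as PySem.List.slice on S.toList compared to the char list.

-- shared predicate helpers: "S[i:i+4] == 'KICK'" and "S[i:i+5] == 'START'"
def kickAt (cs : List Char) (i : Int) : Bool :=
  PySem.List.slice cs (some i) (some (i + 4)) == ['K','I','C','K']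

def startAt (cs : List Char) (i : Int) : Bool :=
  PySem.List.slice cs (some i) (some (i + 5)) == ['S','T','A','R','T']

-- ===== PORT A =====
def f (S : String) : Int :=
  let cs := S.toList
  ((PySem.List.pyRange 0 (PySem.Str.len S) 1).foldl
      (fun (st : Int × Int) i =>
        if kickAt cs i then (st.1, st.2 + 1)
        else if startAt cs i then (st.1 + st.2, st.2)
        else st)
      (0, 0)).1

-- ===== PORT B =====
-- B's for-loop over startIdx with its inner while advancing the kick pointer (the unconsumed kick list)
def tpCount : List Int → List Int → Int → Int → Int
  | _, [], _, total => total
  | [], _ :: ss, kc, total => tpCount [] ss kc (total + kc)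
  | k :: ks, s :: ss, kc, total =>
      if k < s then tpCount ks (s :: ss) (kc + 1) total
      else tpCount (k :: ks) ss kc (total + kc)
termination_by ks ss _ _ => (ks.length, ss.length)

def f_alt (S : String) : Int :=
  let cs := S.toList
  let n := PySem.Str.len S
  let kickIdx := (PySem.List.pyRange 0 n 1).filter (fun i => kickAt cs i)
  let startIdx := (PySem.List.pyRange 0 n 1).filter (fun i => startAt cs i)
  tpCount kickIdx startIdx 0 0

-- ===== PRECONDITION & SPEC =====
def Spec_f (S : String) (out : Int) : Prop := out = f_alt S
instance (S : String) (out : Int) : Decidable (Spec_f S out) := by unfold Spec_f; infer_instance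

-- ===== CLAIM (what is proved, stated in full; the proofs are below) =====
def Claim_equal_f : Prop := ∀ (S : String), Dom_f S → Spec_f S (f S)

-- ===== LEMMAS AND PROOFS =====

-- number of KICK matches at positions < i
def kcount (cs : List Char) (i : Int) : Int :=
  ((PySem.List.pyRange 0 i 1).countP (kickAt cs) : Int)

-- a position cannot match both 'KICK' and 'START' (the slices would have to start with both 'K' and 'S')
lemma not_kick_and_start (cs : List Char) (i : Int) (h0 : 0 ≤ i)
    (hk : kickAt cs i = true) (hs : startAt cs i = true) : False := by
  simp only [kickAt, startAt, beq_iff_eq] at hk hs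
  rw [PySem.List.slice_toNat cs h0 (by omega)] at hk hs
  have e4 : (i + 4).toNat - i.toNat = 4 := by omega
  have e5 : (i + 5).toNat - i.toNat = 5 := by omega
  rw [e4] at hk
  rw [e5] at hs
  have h1 := congrArg (fun l => l[0]?) hk
  have h2 := congrArg (fun l => l[0]?) hs
  simp at h1 h2
  rw [h1] at h2
  exact absurd h2 (by decide)

-- characterisation of A's fold: first component = sum of kcount over effective START positions,
-- second component = running KICK count
lemma foldA (cs : List Char) (m : Nat) :
    (PySem.List.pyRange 0 (m : Int) 1).foldl
      (fun (st : Int × Int) i =>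
        if kickAt cs i then (st.1, st.2 + 1)
        else if startAt cs i then (st.1 + st.2, st.2)
        else st) (0, 0)
    = ((((PySem.List.pyRange 0 (m : Int) 1).filter
          (fun i => !kickAt cs i && startAt cs i)).map (kcount cs)).sum,
       kcount cs (m : Int)) := by
  induction m with
  | zero => simp [kcount]
  | succ m ih =>
      have hcast : ((m + 1 : Nat) : Int) = (m : Int) + 1 := by push_cast; ring
      rw [hcast, PySem.List.pyRange_one_succ_right (a := 0) (b := (m : Int)) (by omega)]
      rw [List.foldl_append, ih]
      have hkc : kcount cs ((m : Int) + 1)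
          = kcount cs (m : Int) + (if kickAt cs (m : Int) then 1 else 0) := by
        unfold kcount
        rw [PySem.List.pyRange_one_succ_right (a := 0) (b := (m : Int)) (by omega)]
        rw [List.countP_append]
        simp [List.countP_cons]
      simp only [List.foldl_cons, List.foldl_nil, List.filter_append, List.map_append,
        List.sum_append]
      by_cases hk : kickAt cs (m : Int)
      · simp [hk, hkc]
      · by_cases hs : startAt cs (m : Int)
        · simp [hk, hs, hkc]
        · simp [hk, hs, hkc]

-- characterisation of B's two-pointer pass on sorted lists
lemma tp_spec (ks ss : List Int) (kc total : Int)
    (hks : ks.Pairwise (· ≤ ·)) (hss : ss.Pairwise (· ≤ ·)) :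
    tpCount ks ss kc total
      = total + (ss.map (fun s => kc + (ks.countP (fun k => decide (k < s)) : Int))).sum := by
  revert hks hss
  induction ks, ss, kc, total using tpCount.induct with
  | case1 ks kc total => intro _ _; simp [tpCount]
  | case2 s ss kc total ih =>
      intro hks hss
      rw [tpCount, ih (by simp) (hss.sublist (List.sublist_cons_self _ _))]
      simp; ring
  | case3 k ks s ss kc total hlt ih =>
      intro hks hss
      rw [tpCount, if_pos hlt, ih (hks.sublist (List.sublist_cons_self _ _)) hss]
      have hmono : ∀ s' ∈ s :: ss, k < s' := by
        intro s' hs'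
        rcases List.mem_cons.mp hs' with rfl | hs'
        · exact hlt
        · exact lt_of_lt_of_le hlt ((List.pairwise_cons.mp hss).1 s' hs')
      congr 1
      exact congrArg List.sum (List.map_congr_left fun a ha => by
        have hk : k < a := hmono a ha
        simp [hk]; ring)
  | case4 k ks s ss kc total hlt ih =>
      intro hks hss
      rw [tpCount, if_neg hlt, ih hks (hss.sublist (List.sublist_cons_self _ _))]
      have h0 : (k :: ks).countP (fun k' => decide (k' < s)) = 0 := by
        apply List.countP_eq_zero.mpr
        intro a ha
        rcases List.mem_cons.mp ha with rfl | ha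
        · simpa using hlt
        · have := (List.pairwise_cons.mp hks).1 a ha
          simp; omega
      simp [h0]; ring

-- counting the kicks before s in the global kick list = kcount at s
lemma countP_kickIdx (cs : List Char) (n s : Int) (h0 : 0 ≤ s) (hn : s ≤ n) :
    (((PySem.List.pyRange 0 n 1).filter (fun i => kickAt cs i)).countP
        (fun k => decide (k < s)) : Int) = kcount cs s := by
  rw [List.countP_filter]
  rw [PySem.List.pyRange_one_append 0 s n h0 hn, List.countP_append]
  have h1 : (PySem.List.pyRange 0 s 1).countP (fun a => decide (a < s) && kickAt cs a)
      = (PySem.List.pyRange 0 s 1).countP (kickAt cs) := by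
    apply List.countP_congr
    intro x hx
    have := (PySem.List.mem_pyRange_one.mp hx).2
    simp [this]
  have h2 : (PySem.List.pyRange s n 1).countP (fun a => decide (a < s) && kickAt cs a) = 0 := by
    apply List.countP_eq_zero.mpr
    intro a ha
    have := (PySem.List.mem_pyRange_one.mp ha).1
    simp; omega
  rw [h1, h2]
  simp [kcount]

-- ===== VERDICT (by name: the statement is the Claim_ definition above) =====
theorem f_spec : Claim_equal_f := by
  unfold Claim_equal_f
  intro S _
  unfold Spec_f f f_alt
  simp only [PySem.Str.len_eq]
  set cs := S.toList with hcs
  set n : Int := (cs.length : Int) with hn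
  rw [foldA cs cs.length]
  have hpw : ∀ p : Int → Bool, ((PySem.List.pyRange 0 n 1).filter p).Pairwise (· ≤ ·) :=
    fun p => ((PySem.List.pairwise_lt_pyRange_one 0 n).filter p).imp le_of_lt
  rw [tp_spec _ _ 0 0 (hpw _) (hpw _)]
  have hfilter : (PySem.List.pyRange 0 n 1).filter (fun i => startAt cs i)
      = (PySem.List.pyRange 0 n 1).filter (fun i => !kickAt cs i && startAt cs i) := by
    apply List.filter_congr
    intro i hi
    have h0 : 0 ≤ i := (PySem.List.mem_pyRange_one.mp hi).1
    by_cases hs : startAt cs i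
    · have hk : kickAt cs i = false := by
        by_contra h
        exact not_kick_and_start cs i h0 (by simpa using h) hs
      simp [hs, hk]
    · simp [hs]
  rw [hfilter]
  rw [zero_add]
  apply congrArg List.sum
  apply List.map_congr_left
  intro s hs
  have hmem := List.mem_filter.mp hs
  have hrng := PySem.List.mem_pyRange_one.mp hmem.1
  rw [zero_add, ← countP_kickIdx cs n s hrng.1 (le_of_lt hrng.2)]
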